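-- pv_equiv track=rewrite | github.com/gira-de/splat | splat/utils/command_runner/safe_run.py | is_command_whitelisted
-- ===== SOURCE A (Python) =====
-- from typing import Literal, cast
--
-- COMMAND_WHITELIST = Literal[
--     "/splat/.local/bin/pipenv", "/usr/bin/yarn", "/splat/.local/bin/poetry", "/usr/bin/git", "/splat/.local/bin/uv"
-- ]
--
-- COMMAND_ARGS_WHITELIST: dict[COMMAND_WHITELIST, list[tuple[str, ...]]] = {
--     "/splat/.local/bin/pipenv": [
--         ("install",),
--         ("requirements",),
--         ("run", "pip", "freeze"),
--         ("run", "pip-audit"),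
--         ("install", "pip-audit"),
--         ("upgrade",),
--         ("graph",),
--         ("update",),
--     ],
--     "/usr/bin/yarn": [("install",), ("audit",), ("upgrade",)],
--     "/splat/.local/bin/poetry": [
--         ("sync",),
--         ("export",),
--         ("add",),
--         ("lock",),
--         ("add", "pip-audit"),
--         ("run", "pip-audit"),
--         ("env", "use"),
--     ],
--     "/usr/bin/git": [("check-ignore",)],
--     "/splat/.local/bin/uv": [
--         ("sync",),
--         ("export",),
--         ("run", "pip-audit"),
--         ("add",),
--         ("lock",),
--     ],
-- }
--
-- def is_command_whitelisted(cmd: str, args: list[str]) -> bool: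
--     if cmd not in COMMAND_ARGS_WHITELIST:
--         return False
--     allowed_args = COMMAND_ARGS_WHITELIST[cast(COMMAND_WHITELIST, cmd)]
--
--     for arg in allowed_args:
--         if args[: len(arg)] == list(arg):
--             # Ensures no flags are present in the allowed args part
--             if all(not part.startswith("-") for part in args[: len(arg)]):
--                 return True
--     return False
-- ===== SOURCE B (Python) =====
-- # Whitelist flattened into one frozenset of full prefix tuples (command, *allowed_args).
-- _FLAT = frozenset([
--     ("/splat/.local/bin/pipenv", "install"),
--     ("/splat/.local/bin/pipenv", "requirements"),
--     ("/splat/.local/bin/pipenv", "run", "pip", "freeze"),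
--     ("/splat/.local/bin/pipenv", "run", "pip-audit"),
--     ("/splat/.local/bin/pipenv", "install", "pip-audit"),
--     ("/splat/.local/bin/pipenv", "upgrade"),
--     ("/splat/.local/bin/pipenv", "graph"),
--     ("/splat/.local/bin/pipenv", "update"),
--     ("/usr/bin/yarn", "install"),
--     ("/usr/bin/yarn", "audit"),
--     ("/usr/bin/yarn", "upgrade"),
--     ("/splat/.local/bin/poetry", "sync"),
--     ("/splat/.local/bin/poetry", "export"),
--     ("/splat/.local/bin/poetry", "add"),
--     ("/splat/.local/bin/poetry", "lock"),
--     ("/splat/.local/bin/poetry", "add", "pip-audit"),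
--     ("/splat/.local/bin/poetry", "run", "pip-audit"),
--     ("/splat/.local/bin/poetry", "env", "use"),
--     ("/usr/bin/git", "check-ignore"),
--     ("/splat/.local/bin/uv", "sync"),
--     ("/splat/.local/bin/uv", "export"),
--     ("/splat/.local/bin/uv", "run", "pip-audit"),
--     ("/splat/.local/bin/uv", "add"),
--     ("/splat/.local/bin/uv", "lock"),
-- ])
--
-- def is_command_whitelisted(cmd: str, args: list[str]) -> bool:
--     # Allowed arg tuples have length 1..3; one membership probe per prefix length.
--     return any((cmd, *args[:n]) in _FLAT for n in (1, 2, 3))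
-- ===== Notes on version B (the rewrite author's own statement) =====
-- stated objective: simpler
-- what changed: B flattens the per-command dict of allowed arg tuples into one frozenset of full (cmd, *prefix) tuples and replaces A's dict lookup plus loop over tuples (with a per-prefix flag re-check) by one set-membership probe per prefix length 1..3; the startswith('-') check is dropped as vacuous since no whitelist entry starts with '-'.
import Mathlib
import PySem

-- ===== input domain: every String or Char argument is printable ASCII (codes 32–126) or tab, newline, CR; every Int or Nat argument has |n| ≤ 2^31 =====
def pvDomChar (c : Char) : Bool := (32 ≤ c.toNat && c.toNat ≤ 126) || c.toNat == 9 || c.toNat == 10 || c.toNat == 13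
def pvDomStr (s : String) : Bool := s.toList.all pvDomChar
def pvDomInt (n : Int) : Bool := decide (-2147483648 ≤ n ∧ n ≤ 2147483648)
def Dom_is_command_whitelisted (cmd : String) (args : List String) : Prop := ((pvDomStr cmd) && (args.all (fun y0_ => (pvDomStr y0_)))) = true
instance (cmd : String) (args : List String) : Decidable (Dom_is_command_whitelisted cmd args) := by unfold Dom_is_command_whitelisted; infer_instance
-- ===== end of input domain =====

-- B flattens the per-command whitelist into one set of full (cmd :: prefix) tuples and
-- probes it once per prefix length 1..3, dropping the vacuous flag check; objective: simpler.

-- ===== PORT A =====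
-- A's COMMAND_ARGS_WHITELIST dict (tuples as lists), insertion order.
def pvWhitelist : PySem.Dict String (List (List String)) :=
  PySem.Dict.ofList
    [ ("/splat/.local/bin/pipenv",
        [["install"], ["requirements"], ["run", "pip", "freeze"], ["run", "pip-audit"],
         ["install", "pip-audit"], ["upgrade"], ["graph"], ["update"]]),
      ("/usr/bin/yarn", [["install"], ["audit"], ["upgrade"]]),
      ("/splat/.local/bin/poetry",
        [["sync"], ["export"], ["add"], ["lock"], ["add", "pip-audit"],
         ["run", "pip-audit"], ["env", "use"]]),
      ("/usr/bin/git", [["check-ignore"]]),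
      ("/splat/.local/bin/uv",
        [["sync"], ["export"], ["run", "pip-audit"], ["add"], ["lock"]]) ]

-- the 'for arg in allowed_args' loop with early return; args[:len(arg)] = List.take (nonnegative bound, exact)
def pvLoopA (args : List String) : List (List String) → Bool
  | [] => false
  | arg :: rest =>
    if args.take arg.length == arg then
      if (args.take arg.length).all (fun part => !(PySem.Str.startswith part "-")) then true
      else pvLoopA args rest
    else pvLoopA args rest

def is_command_whitelisted (cmd : String) (args : List String) : Bool :=
  match pvWhitelist.get? cmd with
  | none => false            -- 'if cmd not in COMMAND_ARGS_WHITELIST: return False'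
  | some allowed_args => pvLoopA args allowed_args

-- ===== PORT B =====
-- B's _FLAT frozenset of (cmd, *allowed_args) tuples, as a PySem.Set of lists.
def pvFlat : PySem.Set (List String) :=
  PySem.Set.ofList
    [ ["/splat/.local/bin/pipenv", "install"],
      ["/splat/.local/bin/pipenv", "requirements"],
      ["/splat/.local/bin/pipenv", "run", "pip", "freeze"],
      ["/splat/.local/bin/pipenv", "run", "pip-audit"],
      ["/splat/.local/bin/pipenv", "install", "pip-audit"],
      ["/splat/.local/bin/pipenv", "upgrade"],
      ["/splat/.local/bin/pipenv", "graph"],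
      ["/splat/.local/bin/pipenv", "update"],
      ["/usr/bin/yarn", "install"],
      ["/usr/bin/yarn", "audit"],
      ["/usr/bin/yarn", "upgrade"],
      ["/splat/.local/bin/poetry", "sync"],
      ["/splat/.local/bin/poetry", "export"],
      ["/splat/.local/bin/poetry", "add"],
      ["/splat/.local/bin/poetry", "lock"],
      ["/splat/.local/bin/poetry", "add", "pip-audit"],
      ["/splat/.local/bin/poetry", "run", "pip-audit"],
      ["/splat/.local/bin/poetry", "env", "use"],
      ["/usr/bin/git", "check-ignore"],
      ["/splat/.local/bin/uv", "sync"],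
      ["/splat/.local/bin/uv", "export"],
      ["/splat/.local/bin/uv", "run", "pip-audit"],
      ["/splat/.local/bin/uv", "add"],
      ["/splat/.local/bin/uv", "lock"] ]

-- any((cmd, *args[:n]) in _FLAT for n in (1, 2, 3))
def is_command_whitelisted_alt (cmd : String) (args : List String) : Bool :=
  [1, 2, 3].any (fun n => PySem.Set.contains pvFlat (cmd :: args.take n))

-- ===== PRECONDITION & SPEC =====
def Spec_is_command_whitelisted (cmd : String) (args : List String) (out : Bool) : Prop := out = is_command_whitelisted_alt cmd args
instance (cmd : String) (args : List String) (out : Bool) : Decidable (Spec_is_command_whitelisted cmd args out) := by unfold Spec_is_command_whitelisted; infer_instance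

-- ===== CLAIM (what is proved, stated in full; the proofs are below) =====
def Claim_equal_is_command_whitelisted : Prop := ∀ (cmd : String) (args : List String), Dom_is_command_whitelisted cmd args → Spec_is_command_whitelisted cmd args (is_command_whitelisted cmd args)

-- ===== LEMMAS AND PROOFS =====

-- No whitelist entry contains a part starting with '-'
def pvNoFlags (l : List (List String)) : Bool :=
  l.all (fun arg => arg.all (fun part => !(PySem.Str.startswith part "-")))

-- Every whitelist entry has length between 1 and 3
def pvLensOk (l : List (List String)) : Bool :=
  l.all (fun arg => decide (1 ≤ arg.length) && decide (arg.length ≤ 3))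

-- A's loop, when no allowed tuple contains flag-like parts, is a plain prefix-match scan.
theorem pvLoopA_eq_any (args : List String) (l : List (List String))
    (h : pvNoFlags l = true) :
    pvLoopA args l = l.any (fun arg => args.take arg.length == arg) := by
  induction l with
  | nil => rfl
  | cons arg rest ih =>
    simp only [pvNoFlags, List.all_cons, Bool.and_eq_true] at h
    simp only [pvLoopA, List.any_cons]
    by_cases hp : args.take arg.length == arg
    · have harg : args.take arg.length = arg := by simpa using hp
      rw [if_pos hp, harg, h.1]
      simp
    · rw [if_neg hp, ih h.2]
      simp [hp]

-- taking a shorter prefix of an already-matched prefix matches again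
theorem pvTake_take_eq {α : Type} [DecidableEq α] (args l : List α) (n : Nat)
    (h : args.take n = l) : args.take l.length = l := by
  subst h
  rw [List.length_take]
  rcases Nat.le_total n args.length with hle | hle
  · rw [Nat.min_eq_left hle]
  · rw [Nat.min_eq_right hle, List.take_length, List.take_of_length_le hle]

-- the prefix-length scan over {1,2,3} equals the per-tuple prefix scan (tuple lengths in 1..3)
theorem pvKey (args : List String) (l : List (List String)) (h : pvLensOk l = true) :
    (l.any fun arg => args.take arg.length == arg)
      = [1, 2, 3].any (fun n => l.any (fun arg => args.take n == arg)) := by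
  rw [Bool.eq_iff_iff]
  simp only [List.any_eq_true, beq_iff_eq]
  constructor
  · rintro ⟨arg, hm, heq⟩
    have hl : 1 ≤ arg.length ∧ arg.length ≤ 3 := by
      simp only [pvLensOk, List.all_eq_true, Bool.and_eq_true, decide_eq_true_eq] at h
      exact h arg hm
    refine ⟨arg.length, ?_, arg, hm, heq⟩
    simp only [List.mem_cons, List.not_mem_nil, or_false]
    omega
  · rintro ⟨n, _, arg, hm, heq⟩
    exact ⟨arg, hm, pvTake_take_eq args arg n heq⟩

-- B's flat set restricted to a command not in the dict is empty
theorem pvFlat_none (c : String) (p : List String)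
    (h : pvWhitelist.get? c = none) :
    PySem.Set.contains pvFlat (c :: p) = false := by
  have hk : ¬ c ∈ pvWhitelist.keys := by
    intro hmem
    rw [PySem.Dict.get?_eq_none_iff_not_mem_keys] at h
    exact h hmem
  have hkeys : pvWhitelist.keys =
      ["/splat/.local/bin/pipenv", "/usr/bin/yarn", "/splat/.local/bin/poetry",
       "/usr/bin/git", "/splat/.local/bin/uv"] := by rfl
  rw [hkeys] at hk
  simp only [List.mem_cons, List.not_mem_nil, or_false, not_or] at hk
  obtain ⟨h1, h2, h3, h4, h5⟩ := hk
  simp [pvFlat, PySem.Set.contains, List.contains_eq_mem, h1, h2, h3, h4, h5]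

-- B's flat set restricted to a whitelisted command is that command's allowed list
theorem pvFlat_some (c : String) (allowed : List (List String)) (p : List String)
    (hg : pvWhitelist.get? c = some allowed) :
    PySem.Set.contains pvFlat (c :: p) = allowed.any (fun arg => p == arg) := by
  have hit : (c, allowed) ∈ pvWhitelist.items :=
    PySem.Dict.mem_items_of_get?_eq_some pvWhitelist hg
  have hitems : pvWhitelist.items =
    [ ("/splat/.local/bin/pipenv",
        [["install"], ["requirements"], ["run", "pip", "freeze"], ["run", "pip-audit"],
         ["install", "pip-audit"], ["upgrade"], ["graph"], ["update"]]),
      ("/usr/bin/yarn", [["install"], ["audit"], ["upgrade"]]),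
      ("/splat/.local/bin/poetry",
        [["sync"], ["export"], ["add"], ["lock"], ["add", "pip-audit"],
         ["run", "pip-audit"], ["env", "use"]]),
      ("/usr/bin/git", [["check-ignore"]]),
      ("/splat/.local/bin/uv",
        [["sync"], ["export"], ["run", "pip-audit"], ["add"], ["lock"]]) ] := by rfl
  rw [hitems] at hit
  simp only [List.mem_cons, List.not_mem_nil, or_false, Prod.mk.injEq] at hit
  rcases hit with ⟨hc, h⟩ | ⟨hc, h⟩ | ⟨hc, h⟩ | ⟨hc, h⟩ | ⟨hc, h⟩ <;> subst hc <;> subst h <;>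
    simp [pvFlat, PySem.Set.contains, List.contains_eq_mem, beq_eq_decide]

-- pvNoFlags / pvLensOk hold for every value stored in pvWhitelist
theorem pvProps_of_get {cmd : String} {allowed : List (List String)}
    (hg : pvWhitelist.get? cmd = some allowed) :
    pvNoFlags allowed = true ∧ pvLensOk allowed = true := by
  have hit : (cmd, allowed) ∈ pvWhitelist.items :=
    PySem.Dict.mem_items_of_get?_eq_some pvWhitelist hg
  have hitems : pvWhitelist.items =
    [ ("/splat/.local/bin/pipenv",
        [["install"], ["requirements"], ["run", "pip", "freeze"], ["run", "pip-audit"],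
         ["install", "pip-audit"], ["upgrade"], ["graph"], ["update"]]),
      ("/usr/bin/yarn", [["install"], ["audit"], ["upgrade"]]),
      ("/splat/.local/bin/poetry",
        [["sync"], ["export"], ["add"], ["lock"], ["add", "pip-audit"],
         ["run", "pip-audit"], ["env", "use"]]),
      ("/usr/bin/git", [["check-ignore"]]),
      ("/splat/.local/bin/uv",
        [["sync"], ["export"], ["run", "pip-audit"], ["add"], ["lock"]]) ] := by rfl
  rw [hitems] at hit
  simp only [List.mem_cons, List.not_mem_nil, or_false, Prod.mk.injEq] at hit
  rcases hit with ⟨_, h⟩ | ⟨_, h⟩ | ⟨_, h⟩ | ⟨_, h⟩ | ⟨_, h⟩ <;> subst h <;> exact ⟨by decide, by decide⟩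

-- ===== VERDICT (by name: the statement is the Claim_ definition above) =====
theorem is_command_whitelisted_spec : Claim_equal_is_command_whitelisted := by
  intro cmd args _
  unfold Spec_is_command_whitelisted is_command_whitelisted is_command_whitelisted_alt
  cases hget : pvWhitelist.get? cmd with
  | none =>
    simp only [List.any_cons, List.any_nil, pvFlat_none cmd _ hget, Bool.or_self]
  | some allowed =>
    obtain ⟨hnf, hlen⟩ := pvProps_of_get hget
    calc pvLoopA args allowed
        = allowed.any (fun arg => args.take arg.length == arg) := pvLoopA_eq_any args allowed hnf
      _ = [1, 2, 3].any (fun n => allowed.any (fun arg => args.take n == arg)) := pvKey args allowed hlen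
      _ = [1, 2, 3].any (fun n => PySem.Set.contains pvFlat (cmd :: args.take n)) := by
            simp only [pvFlat_some cmd allowed _ hget]
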